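-- pv_equiv track=rewrite | github.com/abrown1wpi/vex_python_compiler | compiler.py | get_contents_after_last_import
-- ===== SOURCE A (Python) =====
-- def get_contents_after_last_import(text):
--     lines = text.splitlines()
--     last_import_index = -1
--     for i, line in enumerate(lines):
--         stripped = line.strip()
--         if stripped.startswith('import ') or stripped.startswith('from '):
--             last_import_index = i
--     if last_import_index == -1:
--         return text
--     if last_import_index + 1 >= len(lines):
--         return ""
--     return "\n".join(lines[last_import_index + 1:])
-- ===== SOURCE B (Python) =====
-- def get_contents_after_last_import(text):
--     lines = text.splitlines()
--     for i in range(len(lines) - 1, -1, -1):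
--         stripped = lines[i].strip()
--         if stripped.startswith('import ') or stripped.startswith('from '):
--             return "\n".join(lines[i + 1:])
--     return text
-- ===== Notes on version B (the rewrite author's own statement) =====
-- stated objective: simpler
-- what changed: B scans the lines in reverse and returns at the first import/from line found, instead of a full forward pass recording the last match followed by separate -1 and past-the-end special cases (joining the empty tail already yields '').
import Mathlib
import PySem

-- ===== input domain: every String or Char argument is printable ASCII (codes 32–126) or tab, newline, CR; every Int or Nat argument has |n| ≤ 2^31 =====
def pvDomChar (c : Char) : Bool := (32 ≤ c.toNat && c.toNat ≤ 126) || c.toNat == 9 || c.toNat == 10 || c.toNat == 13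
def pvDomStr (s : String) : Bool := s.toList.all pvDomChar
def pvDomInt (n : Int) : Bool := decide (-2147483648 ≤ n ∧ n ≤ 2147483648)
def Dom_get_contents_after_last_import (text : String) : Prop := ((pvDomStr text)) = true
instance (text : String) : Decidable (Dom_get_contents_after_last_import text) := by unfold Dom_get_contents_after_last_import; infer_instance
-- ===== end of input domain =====

-- B scans the lines in reverse and returns at the first import/from line, dropping A's
-- separate -1 and past-the-end special cases; same result, simpler decomposition.

-- ===== PORT A =====
def get_contents_after_last_import (text : String) : String :=
  let lines := PySem.Str.splitlines text
  let last_import_index :=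
    (PySem.List.enumerate lines 0).foldl
      (fun acc p =>
        let stripped := PySem.Str.strip p.2
        if PySem.Str.startswith stripped "import " || PySem.Str.startswith stripped "from " then
          p.1
        else acc)
      (-1 : Int)
  if last_import_index = -1 then text
  else if last_import_index + 1 ≥ PySem.List.len lines then ""
  else PySem.Str.join "\n" (PySem.List.slice lines (some (last_import_index + 1)) none)

-- ===== PORT B =====
-- countdown loop: argument n means "next index to examine is n-1"; n = 0 means loop fell through
def pvScanB (text : String) (lines : List String) : Nat → String
  | 0 => text
  | n + 1 =>
    let stripped := PySem.Str.strip (lines.getD n "")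
    if PySem.Str.startswith stripped "import " || PySem.Str.startswith stripped "from " then
      PySem.Str.join "\n" (lines.drop (n + 1))
    else pvScanB text lines n

def get_contents_after_last_import_alt (text : String) : String :=
  let lines := PySem.Str.splitlines text
  pvScanB text lines lines.length

-- ===== PRECONDITION & SPEC =====
def Spec_get_contents_after_last_import (text : String) (out : String) : Prop := out = get_contents_after_last_import_alt text
instance (text : String) (out : String) : Decidable (Spec_get_contents_after_last_import text out) := by unfold Spec_get_contents_after_last_import; infer_instance

-- ===== CLAIM (what is proved, stated in full; the proofs are below) =====
def Claim_equal_get_contents_after_last_import : Prop := ∀ (text : String), Dom_get_contents_after_last_import text → Spec_get_contents_after_last_import text (get_contents_after_last_import text)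

-- ===== LEMMAS AND PROOFS =====

def pvPred (l : String) : Bool :=
  PySem.Str.startswith (PySem.Str.strip l) "import " || PySem.Str.startswith (PySem.Str.strip l) "from "

def pvF : Int → (Int × String) → Int := fun acc p =>
  let stripped := PySem.Str.strip p.2
  if PySem.Str.startswith stripped "import " || PySem.Str.startswith stripped "from " then p.1 else acc

def pvAOut (lines : List String) (text : String) : String :=
  let last := (PySem.List.enumerate lines 0).foldl pvF (-1 : Int)
  if last = -1 then text
  else if last + 1 ≥ PySem.List.len lines then ""
  else PySem.Str.join "\n" (PySem.List.slice lines (some (last + 1)) none)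

lemma pvA_eq (text : String) :
    get_contents_after_last_import text = pvAOut (PySem.Str.splitlines text) text := rfl

lemma pvF_id (ps : List (Int × String)) (a : Int)
    (h : ∀ p ∈ ps, pvPred p.2 = false) : ps.foldl pvF a = a := by
  induction ps generalizing a with
  | nil => rfl
  | cons p ps ih =>
    have hp := h p List.mem_cons_self
    have hstep : pvF a p = a := by
      simp only [pvPred, Bool.or_eq_false_iff] at hp
      simp only [pvF]
      rw [hp.1, hp.2]
      rfl
    rw [List.foldl_cons, hstep]
    exact ih a fun q hq => h q (List.mem_cons_of_mem _ hq)

lemma pvF_last (lines : List String) (n : Nat) (hn : n < lines.length)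
    (hp : pvPred lines[n] = true)
    (htail : ∀ l ∈ lines.drop (n + 1), pvPred l = false) :
    (PySem.List.enumerate lines 0).foldl pvF (-1 : Int) = (n : Int) := by
  have htake : lines.take (n + 1) = lines.take n ++ [lines[n]] := by
    rw [List.take_add_one]; simp [List.getElem?_eq_getElem hn]
  have henum := PySem.List.enumerate_append (lines.take (n + 1)) (lines.drop (n + 1)) 0
  rw [List.take_append_drop] at henum
  rw [henum, List.foldl_append]
  rw [pvF_id _ _ (fun p hpmem => by
      rcases (PySem.List.mem_enumerate_iff _ _ p).mp hpmem with ⟨k, hk, rfl⟩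
      exact htail _ (List.getElem_mem hk))]
  have henum2 := PySem.List.enumerate_append (lines.take n) [lines[n]] 0
  rw [← htake] at henum2
  rw [henum2, List.foldl_append]
  have hlt : (lines.take n).length = n := by rw [List.length_take]; omega
  simp only [PySem.List.enumerate_cons, PySem.List.enumerate_nil, List.foldl_cons,
    List.foldl_nil]
  simp only [pvF, hlt]
  rw [if_pos (by simpa only [pvPred] using hp)]
  simp

lemma pvMain (lines : List String) (text : String) :
    ∀ n, n ≤ lines.length → (∀ l ∈ lines.drop n, pvPred l = false) →
      pvAOut lines text = pvScanB text lines n := by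
  intro n
  induction n with
  | zero =>
    intro _ hall
    simp only [List.drop_zero] at hall
    have : (PySem.List.enumerate lines 0).foldl pvF (-1 : Int) = -1 := by
      apply pvF_id
      intro p hpmem
      rcases (PySem.List.mem_enumerate_iff _ _ p).mp hpmem with ⟨k, hk, rfl⟩
      exact hall _ (List.getElem_mem hk)
    simp [pvAOut, this, pvScanB]
  | succ n ih =>
    intro hn hall
    have hnl : n < lines.length := by omega
    have hget : lines.getD n "" = lines[n] := by
      simp [List.getD, List.getElem?_eq_getElem hnl]
    by_cases hp : pvPred lines[n] = true
    · have hfold := pvF_last lines n hnl hp hall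
      simp only [pvScanB, hget]
      rw [if_pos (by simpa only [pvPred] using hp)]
      simp only [pvAOut, hfold]
      rw [if_neg (by omega)]
      by_cases hend : n + 1 ≥ lines.length
      · have hdrop : lines.drop (n + 1) = [] := List.drop_eq_nil_of_le hend
        rw [if_pos (by rw [PySem.List.len_eq]; omega), hdrop]
        rfl
      · rw [if_neg (by rw [PySem.List.len_eq]; omega)]
        rw [show ((n : Int) + 1) = ((n + 1 : Nat) : Int) by push_cast; ring,
          PySem.List.slice_from_natCast]
    · have hdropn : lines.drop n = lines[n] :: lines.drop (n + 1) :=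
        (List.getElem_cons_drop hnl).symm
      simp only [pvScanB, hget]
      rw [if_neg (by simpa only [pvPred] using hp)]
      exact ih (by omega) (by
        rw [hdropn]
        intro l hl
        rcases List.mem_cons.mp hl with rfl | hl
        · exact Bool.not_eq_true _ ▸ (eq_false_of_ne_true hp)
        · exact hall l hl)

-- ===== VERDICT (by name: the statement is the Claim_ definition above) =====
theorem get_contents_after_last_import_spec : Claim_equal_get_contents_after_last_import := by
  intro text _
  show _ = _
  rw [pvA_eq]
  exact pvMain _ text _ le_rfl (by simp)
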